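-- pv_equiv track=rewrite | github.com/unionassessoriajuridica-blip/api-juridica | compute_extension_id.py | extid_from_bytes
-- ===== SOURCE A (Python) =====
-- def extid_from_bytes(bts):
--     chars = []
--     for b in bts:
--         hi = (b >> 4) & 0xF
--         lo = b & 0xF
--         chars.append(chr(ord('a') + hi))
--         chars.append(chr(ord('a') + lo))
--     return ''.join(chars)
-- ===== SOURCE B (Python) =====
-- _TAB = str.maketrans("0123456789abcdef", "abcdefghijklmnop")
--
-- def extid_from_bytes(bts):
--     return bytes(b & 0xFF for b in bts).hex().translate(_TAB)
-- ===== Notes on version B (the rewrite author's own statement) =====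
-- stated objective: idiomatic
-- what changed: B replaces A's per-byte bit-masking Python loop that appends characters one by one with a library pipeline: mask each int to a byte, encode via bytes().hex(), then remap hex digits to letters with str.translate (C-level loops instead of a Python loop).
import Mathlib
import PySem

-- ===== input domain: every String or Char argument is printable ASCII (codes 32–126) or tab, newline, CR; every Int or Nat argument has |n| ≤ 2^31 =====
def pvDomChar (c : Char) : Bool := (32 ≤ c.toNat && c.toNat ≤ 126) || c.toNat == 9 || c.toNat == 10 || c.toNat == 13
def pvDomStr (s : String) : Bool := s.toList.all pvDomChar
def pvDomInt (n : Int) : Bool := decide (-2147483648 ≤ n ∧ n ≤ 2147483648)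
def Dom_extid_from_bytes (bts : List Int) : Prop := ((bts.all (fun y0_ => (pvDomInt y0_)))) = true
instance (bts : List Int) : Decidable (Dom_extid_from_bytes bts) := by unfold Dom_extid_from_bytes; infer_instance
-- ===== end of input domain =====

-- B replaces A's per-byte bit-masking loop with: mask to byte, library hex-encode, translate hex digits to letters.

-- ===== PORT A =====
-- chr(ord('a') + d) for 0 ≤ d < 16 is exactly Char.ofNat (97 + d).toNat
def extid_from_bytes (bts : List Int) : String :=
  let chars := bts.foldl (fun (acc : List Char) (b : Int) =>
    let hi := PySem.Int.band (b >>> (4:Nat)) 15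
    let lo := PySem.Int.band b 15
    acc ++ [Char.ofNat (97 + hi).toNat, Char.ofNat (97 + lo).toNat]) []
  String.mk chars

-- ===== PORT B =====
-- one lowercase hex digit: exactly what bytes.hex() emits per nibble (0 ≤ d < 16)
def pvHexDigit (d : Int) : Char :=
  if d < 10 then Char.ofNat (48 + d).toNat else Char.ofNat (87 + d).toNat

-- the 16-entry translate table '0'..'9','a'..'f' → 'a'..'p' (str.maketrans of Source B)
def pvTab : List (Char × Char) :=
  List.zip "0123456789abcdef".toList "abcdefghijklmnop".toList

def pvTranslate (c : Char) : Char := ((pvTab.lookup c).getD c)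

def extid_from_bytes_alt (bts : List Int) : String :=
  let masked := bts.map (fun b => PySem.Int.band b 255)      -- b & 0xFF
  let hex := masked.flatMap (fun m => [pvHexDigit (m / 16), pvHexDigit (m % 16)])  -- bytes(...).hex()
  String.mk (hex.map pvTranslate)                            -- .translate(_TAB)

-- ===== PRECONDITION & SPEC =====
def Spec_extid_from_bytes (bts : List Int) (out : String) : Prop := out = extid_from_bytes_alt bts
instance (bts : List Int) (out : String) : Decidable (Spec_extid_from_bytes bts out) := by unfold Spec_extid_from_bytes; infer_instance

-- ===== CLAIM (what is proved, stated in full; the proofs are below) =====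
def Claim_equal_extid_from_bytes : Prop := ∀ (bts : List Int), Dom_extid_from_bytes bts → Spec_extid_from_bytes bts (extid_from_bytes bts)

-- ===== LEMMAS AND PROOFS =====

theorem pv_band15 (b : Int) : PySem.Int.band b 15 = b % 16 := by
  rcases le_or_gt 0 b with h | h
  · rw [PySem.Int.band_of_nonneg h (by norm_num)]
    have h2 : b.toNat &&& 15 = b.toNat % 16 := Nat.and_two_pow_sub_one_eq_mod b.toNat 4
    rw [show Int.toNat 15 = 15 from rfl, h2]; omega
  · have : PySem.Int.band b 15 = ((15 : Nat) - ((15:Nat) &&& (-b - 1).toNat) : Nat) := by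
      simp [PySem.Int.band, not_le.mpr h]
    rw [this, Nat.and_comm]
    have : (-b - 1).toNat &&& 15 = (-b - 1).toNat % 16 := Nat.and_two_pow_sub_one_eq_mod _ 4
    rw [this]; omega

theorem pv_band255 (b : Int) : PySem.Int.band b 255 = b % 256 := by
  rcases le_or_gt 0 b with h | h
  · rw [PySem.Int.band_of_nonneg h (by norm_num)]
    have h2 : b.toNat &&& 255 = b.toNat % 256 := Nat.and_two_pow_sub_one_eq_mod b.toNat 8
    rw [show Int.toNat 255 = 255 from rfl, h2]; omega
  · have : PySem.Int.band b 255 = ((255 : Nat) - ((255:Nat) &&& (-b - 1).toNat) : Nat) := by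
      simp [PySem.Int.band, not_le.mpr h]
    rw [this, Nat.and_comm]
    have : (-b - 1).toNat &&& 255 = (-b - 1).toNat % 256 := Nat.and_two_pow_sub_one_eq_mod _ 8
    rw [this]; omega

theorem pv_shr4 (b : Int) : b >>> (4:Nat) = b / 16 := by
  have := Int.shiftRight_eq_div_pow b 4
  norm_num at this
  exact this

-- translate(hexDigit d) is the letter chr(97+d), for nibble values
theorem pv_translate_hex (d : Int) (h0 : 0 ≤ d) (h16 : d < 16) :
    pvTranslate (pvHexDigit d) = Char.ofNat (97 + d).toNat := by
  have : d = ((d.toNat : Nat) : Int) := by omega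
  rw [this]
  have hn : d.toNat < 16 := by omega
  revert hn
  exact (by decide : ∀ n : Nat, n < 16 → pvTranslate (pvHexDigit (n : Int)) = Char.ofNat (97 + (n : Int)).toNat) d.toNat

-- per-element: A's two chars equal B's two translated hex chars
theorem pv_elem (b : Int) :
    [Char.ofNat (97 + PySem.Int.band (b >>> (4:Nat)) 15).toNat,
     Char.ofNat (97 + PySem.Int.band b 15).toNat]
    = [pvTranslate (pvHexDigit (PySem.Int.band b 255 / 16)),
       pvTranslate (pvHexDigit (PySem.Int.band b 255 % 16))] := by
  rw [pv_shr4, pv_band15, pv_band15, pv_band255]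
  have hm0 : 0 ≤ b % 256 := by omega
  have hhi : b / 16 % 16 = b % 256 / 16 := by omega
  have hlo : b % 16 = b % 256 % 16 := by omega
  rw [hhi, hlo,
    pv_translate_hex _ (by omega) (by omega),
    pv_translate_hex _ (by omega) (by omega)]

-- ===== VERDICT (by name: the statement is the Claim_ definition above) =====
theorem extid_from_bytes_spec : Claim_equal_extid_from_bytes := by
  intro bts _
  show extid_from_bytes bts = extid_from_bytes_alt bts
  unfold extid_from_bytes extid_from_bytes_alt
  simp only [PySem.List.foldl_append_eq_flatMap, List.nil_append, List.flatMap_map, List.map_flatMap]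
  congr 1
  apply List.flatMap_congr
  intro b _
  simpa using pv_elem b
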